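-- pv_equiv track=rewrite | github.com/Marcus0907/GramDist | snip.py | closed_pattern
-- ===== SOURCE A (Python) =====
-- def closed_pattern(result_all):
--     list_copy =[]
--     for i in result_all:
--         dict_copy = {}
--         for key,value in i.items():
--             dict_copy[key] = str(value)+"_Y"
--         list_copy.append(dict_copy)
--     for i in range(1,len(result_all)):
--         myDict = result_all[i]
--         for key,value in myDict.items():
--             prior = key[0:len(key)-1]
--             post = key[1:len(key)]
--
--             prior_dict = result_all [i-1]
--             if prior in prior_dict.keys() and post in prior_dict.keys():
--
--                 if myDict[key] == prior_dict[prior]: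
--                     list_copy[i-1][prior] = list_copy[i-1][prior].replace("Y","N")
--                 if myDict[key] == prior_dict[post]:
--                     list_copy[i-1][post] = list_copy[i-1][post].replace("Y","N")
--     return list_copy
-- ===== SOURCE B (Python) =====
-- def closed_pattern(result_all):
--     n = len(result_all)
--
--     def is_closed(level, nxt, key):
--         # key is "closed off" by the next level if some longer pattern there
--         # extends it on either side, both of its trims exist in this level,
--         # and the longer pattern keeps the same count as key.
--         return any(
--             k2[:-1] in level and k2[1:] in level
--             and ((key == k2[:-1] and v2 == level[k2[:-1]])
--                  or (key == k2[1:] and v2 == level[k2[1:]]))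
--             for k2, v2 in nxt.items())
--
--     return [{k: str(v) + ("_N" if i + 1 < n and is_closed(d, result_all[i + 1], k)
--                           else "_Y")
--              for k, v in d.items()}
--             for i, d in enumerate(result_all)]
-- ===== Notes on version B (the rewrite author's own statement) =====
-- stated objective: alternative
-- what changed: A copies every level into '_Y'-tagged dicts and then runs a second index loop that mutates earlier entries in place via string replace; B has no mutable copy at all: it renders each output cell independently in one comprehension, deciding each key's tag with a local closure predicate that scans the next level (and, since the values are ints, writes str(v)+'_N' directly instead of patching a previously built string).
import Mathlib
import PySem

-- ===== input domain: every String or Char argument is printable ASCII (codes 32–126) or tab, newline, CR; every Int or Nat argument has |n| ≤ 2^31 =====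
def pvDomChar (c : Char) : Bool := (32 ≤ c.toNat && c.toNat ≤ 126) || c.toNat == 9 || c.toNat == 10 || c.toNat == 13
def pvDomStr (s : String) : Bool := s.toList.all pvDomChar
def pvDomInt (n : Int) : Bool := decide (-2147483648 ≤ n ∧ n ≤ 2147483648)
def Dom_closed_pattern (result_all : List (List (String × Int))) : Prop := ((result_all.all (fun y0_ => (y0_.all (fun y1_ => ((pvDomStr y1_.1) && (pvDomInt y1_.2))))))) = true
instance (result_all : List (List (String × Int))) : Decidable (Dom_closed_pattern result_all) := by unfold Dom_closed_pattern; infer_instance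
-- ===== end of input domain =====

-- B drops A's build-then-mutate structure (copy every level, then patch earlier entries in place):
-- it renders every output cell independently, deciding each key's tag with a per-key closure
-- predicate that scans the next level (objective: alternative).

-- ===== PORT A =====
-- body of A's inner 'for key,value in myDict.items()' loop (state: the whole list_copy)
def pvAInner (myDict prior_dict : PySem.Dict String Int) (i : Int)
    (lc : List (PySem.Dict String String)) (kv : String × Int) :
    List (PySem.Dict String String) :=
  let key := kv.1
  let prior := PySem.Str.slice key (some 0) (some (PySem.Str.len key - 1))
  let post := PySem.Str.slice key (some 1) (some (PySem.Str.len key))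
  if prior_dict.keys.contains prior && prior_dict.keys.contains post then
    let lc := if myDict.get? key = prior_dict.get? prior then
        PySem.List.pySetD lc (i-1) ((PySem.List.pyGetD lc (i-1) PySem.Dict.empty).insert prior
          (PySem.Str.replace ((PySem.List.pyGetD lc (i-1) PySem.Dict.empty).getD prior "") "Y" "N"))
      else lc
    if myDict.get? key = prior_dict.get? post then
      PySem.List.pySetD lc (i-1) ((PySem.List.pyGetD lc (i-1) PySem.Dict.empty).insert post
        (PySem.Str.replace ((PySem.List.pyGetD lc (i-1) PySem.Dict.empty).getD post "") "Y" "N"))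
    else lc
  else lc

-- dict_copy built for one level ('for key,value in i.items(): dict_copy[key] = str(value)+"_Y"')
def pvYDict (i : PySem.Dict String Int) : PySem.Dict String String :=
  i.items.foldl (fun d kv => d.insert kv.1 (PySem.Int.toStr kv.2 ++ "_Y")) PySem.Dict.empty

def closed_pattern (result_all : List (List (String × Int))) : List (List (String × String)) :=
  let ra : List (PySem.Dict String Int) := result_all.map (fun l => PySem.Dict.ofList l)
  let lc0 : List (PySem.Dict String String) := ra.foldl (fun acc i => acc ++ [pvYDict i]) []
  let lc := (PySem.List.pyRange 1 (ra.length : Int) 1).foldl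
      (fun lc i =>
        (PySem.List.pyGetD ra i PySem.Dict.empty).items.foldl
          (pvAInner (PySem.List.pyGetD ra i PySem.Dict.empty)
                    (PySem.List.pyGetD ra (i-1) PySem.Dict.empty) i) lc) lc0
  lc.map (fun d => d.items)

-- ===== PORT B =====
-- Source B's is_closed(level, nxt, key): any(...) over the items of the next level
def pvIsClosed (level nxt : PySem.Dict String Int) (key : String) : Bool :=
  nxt.items.any (fun kv =>
    level.contains (PySem.Str.slice kv.1 none (some (-1))) &&
    level.contains (PySem.Str.slice kv.1 (some 1) none) &&
    ((key == PySem.Str.slice kv.1 none (some (-1)) &&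
        (level.get? (PySem.Str.slice kv.1 none (some (-1))) == some kv.2)) ||
     (key == PySem.Str.slice kv.1 (some 1) none &&
        (level.get? (PySem.Str.slice kv.1 (some 1) none) == some kv.2))))

-- the outer comprehension over enumerate(result_all); result_all[i+1] is read only under i+1 < n
def closed_pattern_alt (result_all : List (List (String × Int))) : List (List (String × String)) :=
  let ds : List (PySem.Dict String Int) := result_all.map (fun l => PySem.Dict.ofList l)
  (PySem.List.enumerate ds).map (fun id =>
    id.2.items.map (fun kv =>
      (kv.1, PySem.Int.toStr kv.2 ++
        (if decide (id.1 + 1 < (ds.length : Int)) &&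
            pvIsClosed id.2 (PySem.List.pyGetD ds (id.1 + 1) PySem.Dict.empty) kv.1
         then "_N" else "_Y"))))

-- ===== PRECONDITION & SPEC =====
def Spec_closed_pattern (result_all : List (List (String × Int))) (out : List (List (String × String))) : Prop := out = closed_pattern_alt result_all
instance (result_all : List (List (String × Int))) (out : List (List (String × String))) : Decidable (Spec_closed_pattern result_all out) := by unfold Spec_closed_pattern; infer_instance

-- ===== CLAIM (what is proved, stated in full; the proofs are below) =====
def Claim_equal_closed_pattern : Prop := ∀ (result_all : List (List (String × Int))), Dom_closed_pattern result_all → Spec_closed_pattern result_all (closed_pattern result_all)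

-- ===== LEMMAS AND PROOFS =====

def pvSubst (c : Char) : Char := if c = 'Y' then 'N' else c

theorem pv_replace_go (fuel : Nat) (l acc : List Char) (h : l.length ≤ fuel) :
    PySem.Chars.replace.go ['Y'] ['N'] fuel l acc = acc.reverse ++ l.map pvSubst := by
  induction fuel generalizing l acc with
  | zero =>
    have : l = [] := by cases l <;> simp_all
    subst this; simp [PySem.Chars.replace.go]
  | succ n ih =>
    cases l with
    | nil => simp [PySem.Chars.replace.go]
    | cons c t =>
      by_cases hc : c = 'Y'
      · subst hc
        rw [PySem.Chars.replace.go]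
        rw [if_pos (by simp [List.isPrefixOf])]
        have hstep : PySem.Chars.replace.go ['Y'] ['N'] n (List.drop ['Y'].length ('Y' :: t)) (['N'].reverse ++ acc)
            = PySem.Chars.replace.go ['Y'] ['N'] n t ('N' :: acc) := rfl
        rw [hstep, ih t ('N' :: acc) (by simpa using h)]
        simp [pvSubst]
      · rw [PySem.Chars.replace.go]
        have hpf : (['Y'].isPrefixOf (c :: t)) = false := by
          simp [List.isPrefixOf]; exact fun hcc => absurd hcc.symm hc
        rw [hpf]
        simp only [Bool.false_eq_true, ite_false]
        rw [ih t (c :: acc) (by simpa using h)]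
        simp [pvSubst, hc]

theorem pv_replace_chars (s : List Char) :
    PySem.Chars.replace s ['Y'] ['N'] = s.map pvSubst := by
  rw [PySem.Chars.replace]
  simp [pv_replace_go s.length s [] le_rfl]

theorem pv_replace_str (s : String) :
    (PySem.Str.replace s "Y" "N").toList = s.toList.map pvSubst := by
  rw [PySem.Str.toList_replace]
  have h1 : ("Y" : String).toList = ['Y'] := by decide
  have h2 : ("N" : String).toList = ['N'] := by decide
  rw [h1, h2, pv_replace_chars]

-- str(int) contains no 'Y', so pvSubst is the identity on it
theorem pv_digitChar_ne (m : Nat) : Nat.digitChar m ≠ 'Y' := by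
  rcases Nat.lt_or_ge m 16 with h | h
  · interval_cases m <;> decide
  · unfold Nat.digitChar
    repeat rw [if_neg (by omega)]
    decide

theorem pv_toDigitsCore_mem (b f n : Nat) (l : List Char) (c : Char)
    (h : c ∈ Nat.toDigitsCore b f n l) : c ∈ l ∨ ∃ m, c = Nat.digitChar m := by
  induction f generalizing n l with
  | zero => exact Or.inl h
  | succ f ih =>
    rw [Nat.toDigitsCore] at h
    by_cases h0 : n / b = 0
    · simp only [h0, if_pos] at h
      rcases List.mem_cons.mp h with h1 | h1
      · exact Or.inr ⟨n % b, h1⟩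
      · exact Or.inl h1
    · simp only [if_neg h0] at h
      rcases ih _ _ h with h1 | h1
      · rcases List.mem_cons.mp h1 with h2 | h2
        · exact Or.inr ⟨n % b, h2⟩
        · exact Or.inl h2
      · exact Or.inr h1

theorem pv_toChars_no_Y (v : Int) (c : Char) (h : c ∈ PySem.Int.toChars v) : c ≠ 'Y' := by
  unfold PySem.Int.toChars at h
  split_ifs at h with hv
  · rcases List.mem_cons.mp h with h1 | h1
    · subst h1; decide
    · rcases pv_toDigitsCore_mem _ _ _ _ _ h1 with h2 | ⟨m, rfl⟩
      · simp at h2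
      · exact pv_digitChar_ne m
  · rcases pv_toDigitsCore_mem _ _ _ _ _ h with h2 | ⟨m, rfl⟩
    · simp at h2
    · exact pv_digitChar_ne m

theorem pv_toStr_subst (v : Int) : (PySem.Int.toStr v).toList.map pvSubst = (PySem.Int.toStr v).toList := by
  rw [PySem.Int.toList_toStr]
  have h : ∀ c ∈ PySem.Int.toChars v, pvSubst c = c := fun c hc => by
    simp [pvSubst, pv_toChars_no_Y v c hc]
  simpa using List.map_congr_left h

-- the value string A's copy holds for a key: marked (replace applied at least once) or not
def pvRV (v : Int) (mk : Bool) : String :=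
  if mk then PySem.Str.replace (PySem.Int.toStr v) "Y" "N" ++ "_N" else PySem.Int.toStr v ++ "_Y"

-- and what that string actually is, since str(v) has no 'Y' to replace
theorem pv_rv_eq (v : Int) (mk : Bool) :
    pvRV v mk = PySem.Int.toStr v ++ (if mk then "_N" else "_Y") := by
  cases mk with
  | false => rfl
  | true =>
    simp only [pvRV, ite_true]
    congr 1
    apply String.toList_inj.mp
    rw [pv_replace_str, pv_toStr_subst]

theorem pv_subst_subst (c : Char) : pvSubst (pvSubst c) = pvSubst c := by
  by_cases h : c = 'Y' <;> simp [pvSubst, h]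

theorem pv_replace_rv (v : Int) (mk : Bool) :
    PySem.Str.replace (pvRV v mk) "Y" "N" = PySem.Str.replace (PySem.Int.toStr v) "Y" "N" ++ "_N" := by
  apply String.toList_inj.mp
  rw [pv_replace_str]
  cases mk with
  | false =>
    simp only [pvRV, ite_false, Bool.false_eq_true, String.toList_append]
    rw [pv_replace_str]
    simp [List.map_append]
    exact ⟨by decide, by decide⟩
  | true =>
    simp only [pvRV, ite_true, String.toList_append]
    rw [pv_replace_str]
    simp only [List.map_append, List.map_map]
    rw [show (pvSubst ∘ pvSubst) = pvSubst from funext pv_subst_subst]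
    congr 1

theorem pv_prior_eq (key : String) :
    PySem.Str.slice key (some 0) (some (PySem.Str.len key - 1)) = PySem.Str.slice key none (some (-1)) := by
  unfold PySem.Str.slice PySem.Str.len
  congr 1
  simp only [PySem.Chars.slice_eq_listSlice, PySem.List.slice_zero_start]
  rcases Nat.eq_zero_or_pos key.toList.length with h | h
  · rw [h]; norm_num
  · have h1 : ((key.toList.length : Int) - 1) = ((key.toList.length - 1 : Nat) : Int) := by omega
    rw [h1, PySem.List.slice_to_natCast, PySem.List.slice_to_neg_one, List.dropLast_eq_take]

theorem pv_post_eq (key : String) :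
    PySem.Str.slice key (some 1) (some (PySem.Str.len key)) = PySem.Str.slice key (some 1) none := by
  unfold PySem.Str.slice PySem.Str.len
  congr 1
  simp only [PySem.Chars.slice_eq_listSlice]
  rw [PySem.List.slice_toNat _ (by norm_num) (by positivity), PySem.List.slice_from _ (by norm_num)]
  simp

def pvRenderD (prev : PySem.Dict String Int) (mk : String → Bool) : PySem.Dict String String :=
  PySem.Dict.mk (prev.items.map (fun kv => (kv.1, pvRV kv.2 (mk kv.1))))

theorem pv_renderD_keys (prev : PySem.Dict String Int) (mk : String → Bool) :
    (pvRenderD prev mk).keys = prev.keys := by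
  simp [pvRenderD, PySem.Dict.keys_mk, PySem.Dict.keys]

theorem pv_renderD_getD (prev : PySem.Dict String Int) (mk : String → Bool)
    (hk : prev.keys.Nodup) {x : String} {v : Int} (hv : prev.get? x = some v) :
    (pvRenderD prev mk).getD x "" = pvRV v (mk x) := by
  have hmem : (x, v) ∈ prev.items := PySem.Dict.mem_items_of_get?_eq_some prev hv
  have hmem2 : (x, pvRV v (mk x)) ∈ (pvRenderD prev mk).items := by
    simp only [pvRenderD, PySem.Dict.items]
    exact List.mem_map.mpr ⟨(x, v), hmem, rfl⟩
  exact PySem.Dict.getD_of_mem_items _ hmem2 (by rw [show (pvRenderD prev mk).keys = prev.keys from pv_renderD_keys prev mk]; exact hk) _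

theorem pv_renderD_insert (prev : PySem.Dict String Int) (mk : String → Bool)
    (hk : prev.keys.Nodup) {x : String} {v : Int} (hv : prev.get? x = some v) :
    (pvRenderD prev mk).insert x (PySem.Str.replace ((pvRenderD prev mk).getD x "") "Y" "N")
      = pvRenderD prev (fun k => k == x || mk k) := by
  rw [pv_renderD_getD prev mk hk hv, pv_replace_rv]
  have hc : (pvRenderD prev mk).contains x = true := by
    rw [PySem.Dict.contains_iff_mem_keys, pv_renderD_keys]
    rw [← PySem.Dict.contains_iff_mem_keys]
    simp [PySem.Dict.contains_eq_isSome_get?, hv]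
  apply PySem.Dict.ext
  rw [PySem.Dict.items_insert_of_contains _ _ hc]
  simp only [pvRenderD, PySem.Dict.items, List.map_map]
  apply List.map_congr_left
  intro kv hkv
  by_cases hx : kv.1 = x
  · have : prev.get? kv.1 = some kv.2 := PySem.Dict.get?_of_mem_items _ hkv hk
    rw [hx] at this
    have hv2 : kv.2 = v := by rw [this] at hv; exact (Option.some_inj.mp hv)
    simp [hx, hv2, pvRV]
  · have hbx : (kv.1 == x) = false := beq_eq_false_iff_ne.mpr hx
    simp [Function.comp, hbx]

theorem pv_set_contains_add (s : PySem.Set String) (x k : String) :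
    PySem.Set.contains (PySem.Set.add s x) k = (k == x || PySem.Set.contains s k) := by
  simp only [PySem.Set.contains, PySem.Set.add]
  split_ifs with h
  · by_cases hkx : k = x
    · subst hkx
      simp only [beq_self_eq_true, Bool.true_or]
      simpa using h
    · simp [beq_eq_false_iff_ne.mpr hkx]
  · simp only [List.contains_append, List.contains_cons, List.contains_nil, Bool.or_false]
    exact Bool.or_comm _ _

theorem pv_ydict_eq (prev : PySem.Dict String Int) (hk : prev.keys.Nodup) :
    pvYDict prev = pvRenderD prev (fun _ => false) := by
  apply PySem.Dict.ext
  rw [pvYDict, PySem.Dict.items_foldl_insert_fresh prev.items (fun kv => kv.1)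
    (fun kv => PySem.Int.toStr kv.2 ++ "_Y") PySem.Dict.empty
    (fun a _ => PySem.Dict.contains_empty (k := a.1)) hk]
  simp [pvRenderD, pvRV, PySem.Dict.empty]

def pvStepAD (myDict prior_dict : PySem.Dict String Int)
    (cp : PySem.Dict String String) (kv : String × Int) : PySem.Dict String String :=
  let key := kv.1
  let prior := PySem.Str.slice key (some 0) (some (PySem.Str.len key - 1))
  let post := PySem.Str.slice key (some 1) (some (PySem.Str.len key))
  if prior_dict.keys.contains prior && prior_dict.keys.contains post then
    let cp := if myDict.get? key = prior_dict.get? prior then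
        cp.insert prior (PySem.Str.replace (cp.getD prior "") "Y" "N")
      else cp
    if myDict.get? key = prior_dict.get? post then
      cp.insert post (PySem.Str.replace (cp.getD post "") "Y" "N")
    else cp
  else cp

theorem pv_keys_contains (d : PySem.Dict String Int) (k : String) :
    d.keys.contains k = d.contains k := by
  rw [Bool.eq_iff_iff]
  rw [PySem.Dict.contains_iff_mem_keys]
  exact List.contains_iff_mem

-- A's inner loop, run on a rendered copy, just grows the marking function (the mark-set fold below)
set_option maxHeartbeats 1000000 in
theorem pv_lockstep (prev nxt : PySem.Dict String Int) (hk : prev.keys.Nodup)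
    (l : List (String × Int)) (hl : ∀ kv ∈ l, nxt.get? kv.1 = some kv.2)
    (M : PySem.Set String) :
    l.foldl (pvStepAD nxt prev) (pvRenderD prev (fun k => PySem.Set.contains M k))
      = pvRenderD prev (fun k => PySem.Set.contains
          (l.foldl (fun m kv =>
            let key := kv.1
            let prior := PySem.Str.slice key none (some (-1))
            let post := PySem.Str.slice key (some 1) none
            if prev.contains prior && prev.contains post then
              let m := if prev.get? prior = some kv.2 then PySem.Set.add m prior else m
              if prev.get? post = some kv.2 then PySem.Set.add m post else m
            else m) M) k) := by
  induction l generalizing M with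
  | nil => rfl
  | cons kv t ih =>
    simp only [List.foldl_cons]
    have hkv := hl kv (List.mem_cons_self ..)
    have hstep : pvStepAD nxt prev (pvRenderD prev (fun k => PySem.Set.contains M k)) kv
        = pvRenderD prev (fun k => PySem.Set.contains
            ((fun m (kv : String × Int) =>
              let key := kv.1
              let prior := PySem.Str.slice key none (some (-1))
              let post := PySem.Str.slice key (some 1) none
              if prev.contains prior && prev.contains post then
                let m := if prev.get? prior = some kv.2 then PySem.Set.add m prior else m
                if prev.get? post = some kv.2 then PySem.Set.add m post else m
              else m) M kv) k) := by
      have e1 : ∀ (x : String) (M' : PySem.Set String),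
          pvRenderD prev (fun k => k == x || PySem.Set.contains M' k)
            = pvRenderD prev (fun k => PySem.Set.contains (PySem.Set.add M' x) k) := by
        intro x M'
        congr 1
        funext k
        rw [pv_set_contains_add]
      simp only [pvStepAD, pv_prior_eq, pv_post_eq, pv_keys_contains, hkv]
      by_cases hc : (prev.contains (PySem.Str.slice kv.1 none (some (-1)))
          && prev.contains (PySem.Str.slice kv.1 (some 1) none)) = true
      · rw [if_pos hc, if_pos hc]
        by_cases h2 : prev.get? (PySem.Str.slice kv.1 (some 1) none) = some kv.2
        · rw [if_pos (show some kv.2 = prev.get? (PySem.Str.slice kv.1 (some 1) none) from h2.symm),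
            if_pos h2]
          by_cases h1 : prev.get? (PySem.Str.slice kv.1 none (some (-1))) = some kv.2
          · rw [if_pos (show some kv.2 = prev.get? (PySem.Str.slice kv.1 none (some (-1))) from h1.symm),
              if_pos h1, pv_renderD_insert prev _ hk h1, e1, pv_renderD_insert prev _ hk h2, e1]
          · rw [if_neg (show ¬ (some kv.2 = prev.get? (PySem.Str.slice kv.1 none (some (-1)))) from
                fun hh => h1 hh.symm), if_neg h1, pv_renderD_insert prev _ hk h2, e1]
        · rw [if_neg (show ¬ (some kv.2 = prev.get? (PySem.Str.slice kv.1 (some 1) none)) from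
              fun hh => h2 hh.symm), if_neg h2]
          by_cases h1 : prev.get? (PySem.Str.slice kv.1 none (some (-1))) = some kv.2
          · rw [if_pos (show some kv.2 = prev.get? (PySem.Str.slice kv.1 none (some (-1))) from h1.symm),
              if_pos h1, pv_renderD_insert prev _ hk h1, e1]
          · rw [if_neg (show ¬ (some kv.2 = prev.get? (PySem.Str.slice kv.1 none (some (-1)))) from
                fun hh => h1 hh.symm), if_neg h1]
      · rw [if_neg hc, if_neg hc]
    rw [hstep]
    exact ih (fun kv2 h2 => hl kv2 (List.mem_cons_of_mem _ h2)) _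

-- membership in the mark-set fold IS Source B's any-predicate
theorem pv_fold_step (prev : PySem.Dict String Int) (M : PySem.Set String) (kv : String × Int) (k : String) :
    PySem.Set.contains
        ((fun m (kv : String × Int) =>
          let key := kv.1
          let prior := PySem.Str.slice key none (some (-1))
          let post := PySem.Str.slice key (some 1) none
          if prev.contains prior && prev.contains post then
            let m := if prev.get? prior = some kv.2 then PySem.Set.add m prior else m
            if prev.get? post = some kv.2 then PySem.Set.add m post else m
          else m) M kv) k
      = ((prev.contains (PySem.Str.slice kv.1 none (some (-1))) &&
          prev.contains (PySem.Str.slice kv.1 (some 1) none) &&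
          ((k == PySem.Str.slice kv.1 none (some (-1)) &&
              (prev.get? (PySem.Str.slice kv.1 none (some (-1))) == some kv.2)) ||
           (k == PySem.Str.slice kv.1 (some 1) none &&
              (prev.get? (PySem.Str.slice kv.1 (some 1) none) == some kv.2))))
        || PySem.Set.contains M k) := by
  simp only []
  by_cases hcb : (prev.contains (PySem.Str.slice kv.1 none (some (-1)))
      && prev.contains (PySem.Str.slice kv.1 (some 1) none)) = true
  · rw [if_pos hcb]
    obtain ⟨hc1, hc2⟩ := Bool.and_eq_true_iff.mp hcb
    split_ifs with h1 h2 h2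
    · simp [pv_set_contains_add, hc1, hc2, beq_iff_eq.mpr h1, beq_iff_eq.mpr h2,
        Bool.or_comm, Bool.or_left_comm, Bool.or_assoc, Bool.beq_eq_decide_eq]
    · simp [pv_set_contains_add, hc1, hc2, beq_iff_eq.mpr h1, beq_eq_false_iff_ne.mpr h2,
        Bool.or_comm, Bool.or_left_comm, Bool.or_assoc, Bool.beq_eq_decide_eq]
    · simp [pv_set_contains_add, hc1, hc2, beq_eq_false_iff_ne.mpr h1, beq_iff_eq.mpr h2,
        Bool.or_comm, Bool.or_left_comm, Bool.or_assoc, Bool.beq_eq_decide_eq]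
    · simp [hc1, hc2, beq_eq_false_iff_ne.mpr h1, beq_eq_false_iff_ne.mpr h2]
  · rw [if_neg hcb, Bool.eq_false_iff.mpr hcb]
    simp

theorem pv_fold_any (prev : PySem.Dict String Int) (l : List (String × Int))
    (M : PySem.Set String) (k : String) :
    PySem.Set.contains
        (l.foldl (fun m kv =>
          let key := kv.1
          let prior := PySem.Str.slice key none (some (-1))
          let post := PySem.Str.slice key (some 1) none
          if prev.contains prior && prev.contains post then
            let m := if prev.get? prior = some kv.2 then PySem.Set.add m prior else m
            if prev.get? post = some kv.2 then PySem.Set.add m post else m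
          else m) M) k
      = (PySem.Set.contains M k || l.any (fun kv =>
          prev.contains (PySem.Str.slice kv.1 none (some (-1))) &&
          prev.contains (PySem.Str.slice kv.1 (some 1) none) &&
          ((k == PySem.Str.slice kv.1 none (some (-1)) &&
              (prev.get? (PySem.Str.slice kv.1 none (some (-1))) == some kv.2)) ||
           (k == PySem.Str.slice kv.1 (some 1) none &&
              (prev.get? (PySem.Str.slice kv.1 (some 1) none) == some kv.2))))) := by
  induction l generalizing M with
  | nil => simp
  | cons kv t ih =>
    simp only [List.foldl_cons, List.any_cons]
    rw [ih, pv_fold_step prev M kv k, Bool.or_assoc, Bool.or_left_comm]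

theorem pv_inner_step (myDict prior_dict : PySem.Dict String Int)
    (lc : List (PySem.Dict String String)) (j : Nat) (hj : j < lc.length) (kv : String × Int) :
    pvAInner myDict prior_dict ((j : Int) + 1) lc kv
      = lc.set j (pvStepAD myDict prior_dict lc[j] kv) := by
  have hi : ((j : Int) + 1 - 1) = (j : Int) := by ring
  have hget : PySem.List.pyGetD lc ((j : Int) + 1 - 1) PySem.Dict.empty = lc[j] := by
    rw [hi, PySem.List.pyGetD_eq_getElem lc _ (by positivity) (by exact_mod_cast hj)]
    simp
  have hset : ∀ d, PySem.List.pySetD lc ((j : Int) + 1 - 1) d = lc.set j d := by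
    intro d
    rw [hi, PySem.List.pySetD_of_nonneg lc d (by positivity)]
    simp
  simp only [pvAInner, pvStepAD, hget, hset]
  by_cases hc : (prior_dict.keys.contains (PySem.Str.slice kv.1 (some 0) (some (PySem.Str.len kv.1 - 1)))
      && prior_dict.keys.contains (PySem.Str.slice kv.1 (some 1) (some (PySem.Str.len kv.1)))) = true
  · rw [if_pos hc, if_pos hc]
    by_cases h1 : myDict.get? kv.1 = prior_dict.get? (PySem.Str.slice kv.1 (some 0) (some (PySem.Str.len kv.1 - 1)))
    · rw [if_pos h1, if_pos h1]
      have hg2 : PySem.List.pyGetD (lc.set j (lc[j].insert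
            (PySem.Str.slice kv.1 (some 0) (some (PySem.Str.len kv.1 - 1)))
            (PySem.Str.replace (lc[j].getD (PySem.Str.slice kv.1 (some 0) (some (PySem.Str.len kv.1 - 1))) "") "Y" "N")))
          ((j : Int) + 1 - 1) PySem.Dict.empty
          = lc[j].insert (PySem.Str.slice kv.1 (some 0) (some (PySem.Str.len kv.1 - 1)))
            (PySem.Str.replace (lc[j].getD (PySem.Str.slice kv.1 (some 0) (some (PySem.Str.len kv.1 - 1))) "") "Y" "N") := by
        rw [hi, PySem.List.pyGetD_eq_getElem _ _ (by positivity) (by simpa using (by exact_mod_cast hj : (j : Int) < lc.length))]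
        simp
      rw [hg2]
      by_cases h2 : myDict.get? kv.1 = prior_dict.get? (PySem.Str.slice kv.1 (some 1) (some (PySem.Str.len kv.1)))
      · rw [if_pos h2, if_pos h2]
        have hs2 : ∀ d d', PySem.List.pySetD (lc.set j d) ((j : Int) + 1 - 1) d' = lc.set j d' := by
          intro d d'
          rw [hi, PySem.List.pySetD_of_nonneg _ d' (by positivity)]
          simp [List.set_set]
        rw [hs2]
      · rw [if_neg h2, if_neg h2]
    · rw [if_neg h1, if_neg h1]
      by_cases h2 : myDict.get? kv.1 = prior_dict.get? (PySem.Str.slice kv.1 (some 1) (some (PySem.Str.len kv.1)))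
      · rw [if_pos h2, if_pos h2, hget, hset]
      · rw [if_neg h2, if_neg h2]
        exact (List.set_getElem_self hj).symm
  · rw [if_neg hc, if_neg hc]
    exact (List.set_getElem_self hj).symm

theorem pv_lift (myDict prior_dict : PySem.Dict String Int) (l : List (String × Int))
    (lc : List (PySem.Dict String String)) (j : Nat) (hj : j < lc.length) :
    l.foldl (pvAInner myDict prior_dict ((j : Int) + 1)) lc
      = lc.set j (l.foldl (pvStepAD myDict prior_dict) lc[j]) := by
  induction l generalizing lc with
  | nil => simp
  | cons kv t ih =>
    simp only [List.foldl_cons]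
    rw [pv_inner_step myDict prior_dict lc j hj kv]
    rw [ih (lc.set j (pvStepAD myDict prior_dict lc[j] kv)) (by simpa using hj)]
    simp [List.set_set]

def pvFD (prev nxt : PySem.Dict String Int) : PySem.Dict String String :=
  nxt.items.foldl (pvStepAD nxt prev) (pvYDict prev)

def pvB (ds : List (PySem.Dict String Int)) (m : Nat) : List (PySem.Dict String String) :=
  (List.range ds.length).map (fun j => if j + 1 < m
    then pvFD (ds.getD j PySem.Dict.empty) (ds.getD (j+1) PySem.Dict.empty)
    else pvYDict (ds.getD j PySem.Dict.empty))

theorem pv_map_range {α β : Type} (xs : List α) (d : α) (f : α → β) :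
    (List.range xs.length).map (fun j => f (xs.getD j d)) = xs.map f := by
  apply List.ext_getElem
  · simp
  · intro j h1 h2
    simp only [List.getElem_map, List.getElem_range, List.length_map, List.length_range] at h2 ⊢
    rw [List.getD_eq_getElem?_getD, List.getElem?_eq_getElem (by simpa using h2)]
    rfl

theorem pv_outer (ds : List (PySem.Dict String Int)) (m : Nat) (hm : m ≤ ds.length) :
    (PySem.List.pyRange 1 (m : Int) 1).foldl
      (fun lc i => (PySem.List.pyGetD ds i PySem.Dict.empty).items.foldl
        (pvAInner (PySem.List.pyGetD ds i PySem.Dict.empty)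
                   (PySem.List.pyGetD ds (i-1) PySem.Dict.empty) i) lc)
      (ds.map pvYDict) = pvB ds m := by
  induction m with
  | zero =>
    rw [PySem.List.pyRange_one_eq_nil (by norm_num)]
    simp only [List.foldl_nil, pvB]
    rw [← pv_map_range ds PySem.Dict.empty pvYDict]
    apply List.map_congr_left
    intro j hj
    simp
  | succ m ih =>
    rcases Nat.eq_zero_or_pos m with hm0 | hm1
    · subst hm0
      rw [show ((1 : Nat) : Int) = 1 from rfl, PySem.List.pyRange_one_eq_nil (by norm_num)]
      simp only [List.foldl_nil, pvB]
      rw [← pv_map_range ds PySem.Dict.empty pvYDict]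
      apply List.map_congr_left
      intro j hj
      have : ¬ (j + 1 < 1) := by omega
      simp [this]
    · have hcast : ((m + 1 : Nat) : Int) = (m : Int) + 1 := by push_cast; ring
      rw [hcast, PySem.List.pyRange_one_succ_right (by exact_mod_cast hm1), List.foldl_append]
      rw [ih (by omega)]
      simp only [List.foldl_cons, List.foldl_nil]
      have hmlt : (m : Int) < ds.length := by exact_mod_cast hm
      have hget_m : PySem.List.pyGetD ds (m : Int) PySem.Dict.empty = ds.getD m PySem.Dict.empty := by
        rw [PySem.List.pyGetD_of_nonneg ds _ (by positivity)]
        simp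
      have hget_m1 : PySem.List.pyGetD ds ((m : Int) - 1) PySem.Dict.empty
          = ds.getD (m - 1) PySem.Dict.empty := by
        rw [PySem.List.pyGetD_of_nonneg ds _ (by omega)]
        congr 1
        omega
      rw [hget_m, hget_m1]
      have hlen : m - 1 < (pvB ds m).length := by simp [pvB]; omega
      have hidx : (m : Int) = ((m - 1 : Nat) : Int) + 1 := by omega
      rw [hidx, pv_lift _ _ _ _ (m-1) hlen]
      have hBm : (pvB ds m)[m-1]'hlen = pvYDict (ds.getD (m-1) PySem.Dict.empty) := by
        simp only [pvB, List.getElem_map, List.getElem_range]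
        have : ¬ (m - 1 + 1 < m) := by omega
        simp [this]
      rw [hBm]
      have hstep : (ds.getD m PySem.Dict.empty).items.foldl
            (pvStepAD (ds.getD m PySem.Dict.empty) (ds.getD (m-1) PySem.Dict.empty))
            (pvYDict (ds.getD (m-1) PySem.Dict.empty))
          = pvFD (ds.getD (m-1) PySem.Dict.empty) (ds.getD m PySem.Dict.empty) := rfl
      rw [hstep]
      apply List.ext_getElem
      · simp [pvB]
      · intro j h1 h2
        simp only [pvB, List.getElem_map, List.getElem_range] at h2 ⊢
        by_cases hj : j = m - 1
        · subst hj
          rw [List.getElem_set_self]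
          have hlt : m - 1 + 1 < m + 1 := by omega
          have : m - 1 + 1 = m := by omega
          simp [hlt, this]
        · rw [List.getElem_set_ne (by omega)]
          simp only [pvB, List.getElem_map, List.getElem_range]
          have : (j + 1 < m) ↔ (j + 1 < m + 1) := by omega
          by_cases hlt : j + 1 < m
          · simp [hlt, this.mp hlt]
          · have hlt2 : ¬ (j + 1 < m + 1) := by omega
            simp [hlt, hlt2]

theorem pv_ydict_items (prev : PySem.Dict String Int) (hk : prev.keys.Nodup) :
    (pvYDict prev).items = prev.items.map (fun kv => (kv.1, PySem.Int.toStr kv.2 ++ "_Y")) := by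
  rw [pv_ydict_eq prev hk]
  simp [pvRenderD, pvRV]

-- one fully-processed level of A = the per-key rendering B computes for that level
theorem pv_level_items (prev nxt : PySem.Dict String Int) (hkp : prev.keys.Nodup) (hkn : nxt.keys.Nodup) :
    (pvFD prev nxt).items
      = prev.items.map (fun kv =>
          (kv.1, PySem.Int.toStr kv.2 ++ (if pvIsClosed prev nxt kv.1 then "_N" else "_Y"))) := by
  rw [pvFD, pv_ydict_eq prev hkp]
  have h0 : pvRenderD prev (fun _ => false)
      = pvRenderD prev (fun k => PySem.Set.contains PySem.Set.empty k) := rfl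
  rw [h0, pv_lockstep prev nxt hkp nxt.items
    (fun kv h => PySem.Dict.get?_of_mem_items _ h hkn) PySem.Set.empty]
  simp only [pvRenderD, PySem.Dict.items]
  apply List.map_congr_left
  intro kv _
  rw [pv_fold_any]
  have he : PySem.Set.contains PySem.Set.empty kv.1 = false := rfl
  rw [he, Bool.false_or, pv_rv_eq]
  rfl

theorem pv_main_core (ds : List (PySem.Dict String Int)) (hk : ∀ d ∈ ds, d.keys.Nodup) :
    ((PySem.List.pyRange 1 (ds.length : Int) 1).foldl
      (fun lc i =>
        (PySem.List.pyGetD ds i PySem.Dict.empty).items.foldl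
          (pvAInner (PySem.List.pyGetD ds i PySem.Dict.empty)
                    (PySem.List.pyGetD ds (i-1) PySem.Dict.empty) i) lc)
      (ds.foldl (fun acc i => acc ++ [pvYDict i]) [])).map (fun d => d.items)
    = (PySem.List.enumerate ds).map (fun id =>
        id.2.items.map (fun kv =>
          (kv.1, PySem.Int.toStr kv.2 ++
            (if decide (id.1 + 1 < (ds.length : Int)) &&
                pvIsClosed id.2 (PySem.List.pyGetD ds (id.1 + 1) PySem.Dict.empty) kv.1
             then "_N" else "_Y")))) := by
  have hlc0 : ds.foldl (fun acc i => acc ++ [pvYDict i]) [] = ds.map pvYDict := by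
    rw [PySem.List.foldl_append_singleton_eq_map]
    rfl
  rw [hlc0, pv_outer ds ds.length le_rfl]
  apply List.ext_getElem
  · simp [pvB, PySem.List.length_enumerate]
  · intro j h1 h2
    simp only [pvB, List.length_map, List.length_range] at h1
    simp only [pvB, List.getElem_map, List.getElem_range, PySem.List.getElem_enumerate]
    have hgd : ds.getD j PySem.Dict.empty = ds[j] := by
      rw [List.getD_eq_getElem?_getD, List.getElem?_eq_getElem h1]
      rfl
    by_cases hlt : j + 1 < ds.length
    · have hdec : decide (((0 : Int) + (j : Int)) + 1 < (ds.length : Int)) = true := by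
        simp only [decide_eq_true_eq]
        push_cast
        omega
      have hgd1 : ds.getD (j+1) PySem.Dict.empty = ds[j+1] := by
        rw [List.getD_eq_getElem?_getD, List.getElem?_eq_getElem hlt]
        rfl
      have hpg : PySem.List.pyGetD ds (((0 : Int) + (j : Int)) + 1) PySem.Dict.empty = ds[j+1] := by
        rw [show ((0 : Int) + (j : Int)) + 1 = ((j + 1 : Nat) : Int) by push_cast; ring,
          PySem.List.pyGetD_eq_getElem ds _ (by positivity) (by exact_mod_cast hlt)]
        simp
      rw [if_pos hlt, hgd, hgd1,
        pv_level_items ds[j] ds[j+1] (hk _ (List.getElem_mem h1)) (hk _ (List.getElem_mem hlt))]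
      apply List.map_congr_left
      intro kv _
      rw [hdec, hpg]
      simp
    · have hdec : decide (((0 : Int) + (j : Int)) + 1 < (ds.length : Int)) = false := by
        simp only [decide_eq_false_iff_not]
        push_cast
        omega
      rw [if_neg hlt, hgd, pv_ydict_items ds[j] (hk _ (List.getElem_mem h1))]
      apply List.map_congr_left
      intro kv _
      rw [hdec]
      simp

-- ===== VERDICT (by name: the statement is the Claim_ definition above) =====
theorem closed_pattern_spec : Claim_equal_closed_pattern := by
  intro result_all _
  unfold Spec_closed_pattern closed_pattern closed_pattern_alt
  exact pv_main_core (result_all.map (fun l => PySem.Dict.ofList l))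
    (by
      intro d hd
      rcases List.mem_map.mp hd with ⟨l, _, rfl⟩
      exact PySem.Dict.nodup_keys_ofList l)
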